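-- pv_equiv track=rewrite | github.com/Sonified/plotbot-v1 | plotbot/data_import_cdf.py | _find_frequency_variable
-- ===== SOURCE A (Python) =====
-- from typing import Dict, List, Optional, Any, Tuple
--
-- def _find_frequency_variable(all_vars: List[str], cdf_file) -> Optional[str]:
--     """Find the frequency variable in the CDF file."""
--     freq_candidates = [
--         var for var in all_vars
--         if any(keyword in var.lower() for keyword in ['freq', 'frequencies'])
--     ]
--
--     if not freq_candidates:
--         return None
--
--     # Prefer more specific frequency variables
--     for preferred in ['Frequencies', 'frequency', 'freq']:
--         if preferred in freq_candidates:
--             return preferred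
--
--     return freq_candidates[0]
-- ===== SOURCE B (Python) =====
-- from typing import Optional, List
--
-- def _find_frequency_variable(all_vars: List[str], cdf_file) -> Optional[str]:
--     """Find the frequency variable in the CDF file."""
--     # Targeted probes: each preferred name itself contains 'freq', so
--     # membership in the candidate list equals membership in all_vars.
--     for preferred in ['Frequencies', 'frequency', 'freq']:
--         if preferred in all_vars:
--             return preferred
--     # Fallback: first variable (in original order) mentioning 'freq'.
--     for var in all_vars:
--         if 'freq' in var.lower():
--             return var
--     return None
-- ===== Notes on version B (the rewrite author's own statement) =====
-- stated objective: simpler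
-- what changed: B never builds the filtered candidate list: it probes the three preferred names directly against all_vars (valid because each preferred name itself contains 'freq') and otherwise does one fallback scan that returns at the first variable containing 'freq'; the redundant 'frequencies' keyword is dropped since it implies 'freq'.
import Mathlib
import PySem

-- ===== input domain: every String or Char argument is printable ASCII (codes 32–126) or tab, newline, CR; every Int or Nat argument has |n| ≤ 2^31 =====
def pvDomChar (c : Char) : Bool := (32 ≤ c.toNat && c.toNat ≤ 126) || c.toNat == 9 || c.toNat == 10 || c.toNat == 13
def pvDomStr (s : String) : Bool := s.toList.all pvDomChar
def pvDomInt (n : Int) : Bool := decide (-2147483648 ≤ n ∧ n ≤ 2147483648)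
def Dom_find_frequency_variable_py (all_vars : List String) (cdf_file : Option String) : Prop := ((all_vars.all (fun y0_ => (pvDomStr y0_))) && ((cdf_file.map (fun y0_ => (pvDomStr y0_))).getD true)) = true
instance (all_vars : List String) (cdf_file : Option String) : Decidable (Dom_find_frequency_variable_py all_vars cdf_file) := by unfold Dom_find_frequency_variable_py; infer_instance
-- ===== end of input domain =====

-- B replaces A's 'build the filtered candidate list, then probe it and index it' by direct
-- probes of the three preferred names in all_vars plus one fallback scan (objective: simpler).

-- ===== PORT A =====
-- A filters all_vars into freq_candidates, returns None if empty, probes the three preferred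
-- names for membership in the candidate list, else returns the first candidate.
def find_frequency_variable_py (all_vars : List String) (_cdf_file : Option String) : Option String :=
  let freq_candidates := all_vars.filter
    (fun var => (["freq", "frequencies"]).any (fun kw => PySem.Str.isIn kw (PySem.Str.lower var)))
  if freq_candidates.isEmpty then none
  else
    match (["Frequencies", "frequency", "freq"]).find? (fun p => freq_candidates.contains p) with
    | some p => some p
    | none => freq_candidates.head?

-- ===== PORT B =====
-- B probes the preferred names directly in all_vars, then one fallback scan for 'freq'.
def find_frequency_variable_py_alt (all_vars : List String) (_cdf_file : Option String) : Option String :=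
  match (["Frequencies", "frequency", "freq"]).find? (fun p => all_vars.contains p) with
  | some p => some p
  | none => all_vars.find? (fun var => PySem.Str.isIn "freq" (PySem.Str.lower var))

-- ===== PRECONDITION & SPEC =====
def Spec_find_frequency_variable_py (all_vars : List String) (cdf_file : Option String) (out : Option String) : Prop := out = find_frequency_variable_py_alt all_vars cdf_file
instance (all_vars : List String) (cdf_file : Option String) (out : Option String) : Decidable (Spec_find_frequency_variable_py all_vars cdf_file out) := by unfold Spec_find_frequency_variable_py; infer_instance

-- ===== CLAIM (what is proved, stated in full; the proofs are below) =====
def Claim_equal_find_frequency_variable_py : Prop := ∀ (all_vars : List String) (cdf_file : Option String), Dom_find_frequency_variable_py all_vars cdf_file → Spec_find_frequency_variable_py all_vars cdf_file (find_frequency_variable_py all_vars cdf_file)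

-- ===== LEMMAS AND PROOFS =====

-- A's two-keyword test collapses to the single 'freq' test: 'frequencies' contains 'freq'.
theorem pv_any_eq (var : String) :
    (["freq", "frequencies"] : List String).any (fun kw => PySem.Str.isIn kw (PySem.Str.lower var))
      = PySem.Str.isIn "freq" (PySem.Str.lower var) := by
  simp only [List.any_cons, List.any_nil, Bool.or_false]
  cases h : PySem.Str.isIn "frequencies" (PySem.Str.lower var) with
  | false => simp
  | true =>
    rw [PySem.Str.isIn_iff_infix] at h
    have hf : ("freq".toList) <:+: (PySem.Str.lower var).toList :=
      List.IsInfix.trans (by decide) h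
    rw [← PySem.Str.isIn_iff_infix] at hf
    rw [hf, Bool.or_true]

-- hence the two filters coincide
theorem pv_filter_eq (all_vars : List String) :
    all_vars.filter
      (fun var => (["freq", "frequencies"]).any (fun kw => PySem.Str.isIn kw (PySem.Str.lower var)))
      = all_vars.filter (fun var => PySem.Str.isIn "freq" (PySem.Str.lower var)) := by
  exact List.filter_congr (fun x _ => pv_any_eq x)

-- ===== VERDICT (by name: the statement is the Claim_ definition above) =====
theorem find_frequency_variable_py_spec : Claim_equal_find_frequency_variable_py := by
  intro all_vars cdf_file _
  unfold Spec_find_frequency_variable_py find_frequency_variable_py find_frequency_variable_py_alt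
  rw [pv_filter_eq]
  have d1 : PySem.Chars.isIn ['f', 'r', 'e', 'q'] (PySem.Chars.lower ['F', 'r', 'e', 'q', 'u', 'e', 'n', 'c', 'i', 'e', 's']) = true := by decide
  have d2 : PySem.Chars.isIn ['f', 'r', 'e', 'q'] (PySem.Chars.lower ['f', 'r', 'e', 'q', 'u', 'e', 'n', 'c', 'y']) = true := by decide
  have d3 : PySem.Chars.isIn ['f', 'r', 'e', 'q'] (PySem.Chars.lower ['f', 'r', 'e', 'q']) = true := by decide
  by_cases h1 : "Frequencies" ∈ all_vars
  · simp [List.find?_cons, h1]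
    exact ⟨⟨"Frequencies", h1, by decide⟩, by simp [d1]⟩
  · by_cases h2 : "frequency" ∈ all_vars
    · simp [List.find?_cons, h1, h2]
      exact ⟨⟨"frequency", h2, by decide⟩, by simp [d2]⟩
    · by_cases h3 : "freq" ∈ all_vars
      · simp [List.find?_cons, h1, h2, h3]
        exact ⟨⟨"freq", h3, by decide⟩, by simp [d3]⟩
      · -- no preferred name present: A's branch is the head of the candidate list (or none
        -- if there are no candidates), B's is the fallback scan; List.head?_filter links them.
        simp [h1, h2, h3, ← List.head?_filter]
        intro hall
        rw [List.filter_eq_nil_iff.mpr (fun a ha => by simp [hall a ha])]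
        rfl
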